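-- pv_equiv track=rewrite | github.com/lkwq007/leetcode-py | 2320-Count-Number-of-Ways-to-Place-House.py | countHousePlacements
-- ===== SOURCE A (Python) =====
-- def countHousePlacements(n: int) -> int:
--     term=10**9+7
--     template=[0]*n
--     dp=[template[:] for _ in range(4)]
--     dp[0][0]=1
--     dp[1][0]=1
--     dp[2][0]=1
--     dp[3][0]=1
--     # em
--     # up
--     # down
--     # full
--     for i in range(1,n):
--         dp[0][i]=dp[0][i-1]+dp[1][i-1]+dp[2][i-1]+dp[3][i-1]
--         dp[1][i]=dp[0][i-1]+dp[2][i-1]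
--         dp[2][i]=dp[0][i-1]+dp[1][i-1]
--         dp[3][i]=dp[0][i-1]
--         for j in range(4):
--             dp[j][i]%=term
--     return (dp[0][-1]+dp[1][-1]+dp[2][-1]+dp[3][-1])%term
-- ===== SOURCE B (Python) =====
-- def countHousePlacements(n: int) -> int:
--     # One street side with n plots admits F(n+2) non-adjacent placements
--     # (Fibonacci, F(1)=F(2)=1); the sides are independent, so the answer is
--     # F(n+2)^2 mod 10**9+7, computed by fast doubling in O(log n).
--     MOD = 10 ** 9 + 7
--
--     def fib_pair(k: int):
--         # returns (F(k) % MOD, F(k+1) % MOD) by fast doubling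
--         if k == 0:
--             return (0, 1)
--         a, b = fib_pair(k >> 1)
--         c = a * (2 * b - a) % MOD
--         d = (a * a + b * b) % MOD
--         if k & 1:
--             return (d, (c + d) % MOD)
--         return (c, d)
--
--     return fib_pair(n + 2)[0] ** 2 % MOD
-- ===== Notes on version B (the rewrite author's own statement) =====
-- stated objective: faster
-- what changed: Replaced the O(n) four-state DP over preallocated lists by the closed form F(n+2)^2 mod 10^9+7 computed with Fibonacci fast doubling in O(log n).
-- outside the precondition, e.g. on countHousePlacements(0): A raises IndexError, B returns 1; on countHousePlacements(-2): A raises IndexError, B returns 0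
import Mathlib
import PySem

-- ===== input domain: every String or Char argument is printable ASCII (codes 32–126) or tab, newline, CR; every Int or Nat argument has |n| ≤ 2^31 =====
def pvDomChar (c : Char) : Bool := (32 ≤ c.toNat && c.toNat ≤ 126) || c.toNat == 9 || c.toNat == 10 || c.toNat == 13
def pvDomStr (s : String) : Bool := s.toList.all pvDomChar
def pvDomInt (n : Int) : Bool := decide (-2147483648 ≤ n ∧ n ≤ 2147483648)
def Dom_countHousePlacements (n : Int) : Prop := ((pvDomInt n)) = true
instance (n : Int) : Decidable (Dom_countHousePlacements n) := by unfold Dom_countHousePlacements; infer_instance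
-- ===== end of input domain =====

-- B replaces A's O(n) four-state DP by the closed form F(n+2)^2 mod 10^9+7
-- computed with Fibonacci fast doubling (O(log n) arithmetic operations).

-- ===== PORT A =====
-- Loop body of A. A's dp[j] lists are written left to right and only
-- dp[j][i-1] (the last written column) is ever read, so each row is carried
-- most-recent-column-first: the write 'dp[j][i] = …' becomes a cons and the
-- read 'dp[j][i-1]' the head; the four recurrences and the 'dp[j][i] %= term'
-- mod (term = 10^9+7) are step for step.
def stepA (dp : List Int × List Int × List Int × List Int) (_i : Int) :
    List Int × List Int × List Int × List Int :=
  let p0 := dp.1.headD 0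
  let p1 := dp.2.1.headD 0
  let p2 := dp.2.2.1.headD 0
  let p3 := dp.2.2.2.headD 0
  (PySem.Int.mod (p0 + p1 + p2 + p3) (10 ^ 9 + 7) :: dp.1,
   PySem.Int.mod (p0 + p2) (10 ^ 9 + 7) :: dp.2.1,
   PySem.Int.mod (p0 + p1) (10 ^ 9 + 7) :: dp.2.2.1,
   PySem.Int.mod p0 (10 ^ 9 + 7) :: dp.2.2.2)

def countHousePlacements (n : Int) : Int :=
  let term : Int := 10 ^ 9 + 7
  let dp := (PySem.List.pyRange 1 n).foldl stepA ([1], [1], [1], [1])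
  PySem.Int.mod
    (dp.1.headD 0 + dp.2.1.headD 0 + dp.2.2.1.headD 0 + dp.2.2.2.headD 0)
    term

-- ===== PORT B =====
-- fib_pair k = (F(k) % MOD, F(k+1) % MOD) by fast doubling, as in Source B
-- (Source B only ever recurses on k >> 1 for k ≥ 0, so a Nat argument is exact).
def fibPairB (k : Nat) : Int × Int :=
  if h : k = 0 then (0, 1)
  else
    let p := fibPairB (k / 2)
    let a := p.1
    let b := p.2
    let c := PySem.Int.mod (a * (2 * b - a)) (10 ^ 9 + 7)
    let d := PySem.Int.mod (a * a + b * b) (10 ^ 9 + 7)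
    if k % 2 = 1 then (d, PySem.Int.mod (c + d) (10 ^ 9 + 7))
    else (c, d)
decreasing_by exact Nat.div_lt_self (Nat.pos_of_ne_zero h) (by norm_num)

def countHousePlacements_alt (n : Int) : Int :=
  PySem.Int.mod ((fibPairB (n + 2).toNat).1 ^ 2) (10 ^ 9 + 7)

-- ===== PRECONDITION & SPEC =====
-- Pre_ excludes exactly n ≤ 0, on which A raises IndexError (dp[0][0] = 1 on
-- the empty row built by [0]*n).
def Pre_countHousePlacements (n : Int) : Prop := 1 ≤ n
instance (n : Int) : Decidable (Pre_countHousePlacements n) := by unfold Pre_countHousePlacements; infer_instance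
def pvWitness_countHousePlacements : Int := (3)

def Spec_countHousePlacements (n : Int) (out : Int) : Prop := out = countHousePlacements_alt n
instance (n : Int) (out : Int) : Decidable (Spec_countHousePlacements n out) := by unfold Spec_countHousePlacements; infer_instance

-- ===== CLAIM (what is proved, stated in full; the proofs are below) =====
def Claim_equal_countHousePlacements : Prop := ∀ (n : Int), Dom_countHousePlacements n → Pre_countHousePlacements n → Spec_countHousePlacements n (countHousePlacements n)

-- ===== LEMMAS AND PROOFS =====

-- the modulus
def P : Int := 10 ^ 9 + 7

theorem hmodP (x : Int) : PySem.Int.mod x (10 ^ 9 + 7) = x % P := by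
  unfold P; exact PySem.Int.mod_eq_emod_of_pos (by norm_num)

theorem modeq_emod (x : Int) : x % P ≡ x [ZMOD P] := Int.emod_emod_of_dvd x dvd_rfl

-- the mathematical value of A's column j:
-- (dp0, dp1, dp2, dp3)[j] = (F(j+2)^2, F(j+1)F(j+2), F(j+1)F(j+2), F(j+1)^2) mod P
def col (j : Nat) : Int × Int × Int × Int :=
  (((Nat.fib (j + 2) : Int) ^ 2) % P,
   ((Nat.fib (j + 1) : Int) * (Nat.fib (j + 2) : Int)) % P,
   ((Nat.fib (j + 1) : Int) * (Nat.fib (j + 2) : Int)) % P,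
   ((Nat.fib (j + 1) : Int) ^ 2) % P)

-- one DP step sends the column-j values to the column-(j+1) values
theorem col_step (j : Nat) :
    ((col j).1 + (col j).2.1 + (col j).2.2.1 + (col j).2.2.2) % P
      = ((Nat.fib (j + 3) : Int) ^ 2) % P ∧
    ((col j).1 + (col j).2.2.1) % P
      = ((Nat.fib (j + 2) : Int) * (Nat.fib (j + 3) : Int)) % P ∧
    ((col j).1 + (col j).2.1) % P
      = ((Nat.fib (j + 2) : Int) * (Nat.fib (j + 3) : Int)) % P ∧
    (col j).1 % P = ((Nat.fib (j + 2) : Int) ^ 2) % P := by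
  have hF : (Nat.fib (j + 3) : Int) = (Nat.fib (j + 1) : Int) + (Nat.fib (j + 2) : Int) := by
    rw [show j + 3 = j + 1 + 2 by omega, Nat.fib_add_two]; push_cast; ring
  simp only [col]
  refine ⟨?_, ?_, ?_, Int.emod_emod_of_dvd _ dvd_rfl⟩
  · have hS : ((Nat.fib (j + 2) : Int) ^ 2
        + (Nat.fib (j + 1) : Int) * (Nat.fib (j + 2) : Int)
        + (Nat.fib (j + 1) : Int) * (Nat.fib (j + 2) : Int)
        + (Nat.fib (j + 1) : Int) ^ 2) = ((Nat.fib (j + 3) : Int)) ^ 2 := by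
      rw [hF]; ring
    exact hS ▸ ((((modeq_emod _).add (modeq_emod _)).add (modeq_emod _)).add (modeq_emod _))
  · have hS : ((Nat.fib (j + 2) : Int) ^ 2
        + (Nat.fib (j + 1) : Int) * (Nat.fib (j + 2) : Int))
        = (Nat.fib (j + 2) : Int) * (Nat.fib (j + 3) : Int) := by
      rw [hF]; ring
    exact hS ▸ ((modeq_emod _).add (modeq_emod _))
  · have hS : ((Nat.fib (j + 2) : Int) ^ 2
        + (Nat.fib (j + 1) : Int) * (Nat.fib (j + 2) : Int))
        = (Nat.fib (j + 2) : Int) * (Nat.fib (j + 3) : Int) := by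
      rw [hF]; ring
    exact hS ▸ ((modeq_emod _).add (modeq_emod _))

-- fold invariant of A's loop: the last elements track col
theorem foldA_invariant (l : List Int) :
    ∀ (j : Nat) (d0 d1 d2 d3 : List Int),
      (d0.headD 0, d1.headD 0, d2.headD 0, d3.headD 0) = col j →
      (((l.foldl stepA (d0, d1, d2, d3)).1.headD 0,
        (l.foldl stepA (d0, d1, d2, d3)).2.1.headD 0,
        (l.foldl stepA (d0, d1, d2, d3)).2.2.1.headD 0,
        (l.foldl stepA (d0, d1, d2, d3)).2.2.2.headD 0)
         = col (j + l.length)) := by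
  induction l with
  | nil => intro j d0 d1 d2 d3 h; simpa using h
  | cons x t ih =>
    intro j d0 d1 d2 d3 h
    simp only [col, Prod.mk.injEq] at h
    obtain ⟨h0, h1, h2, h3⟩ := h
    simp only [List.foldl_cons, List.length_cons]
    rw [show j + (t.length + 1) = (j + 1) + t.length by omega]
    refine ih (j + 1) _ _ _ _ ?_
    have hc := col_step j
    simp only [col] at hc
    obtain ⟨c1, c2, c3, c4⟩ := hc
    simp only [List.headD_cons, h0, h1, h2, h3, hmodP]
    simp only [col, Prod.mk.injEq]
    rw [show j + 1 + 2 = j + 3 by omega, show j + 1 + 1 = j + 2 by omega]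
    exact ⟨c1, c3, c2, c4⟩
  -- note: the second component of the step uses p0 + p2, the third p0 + p1

-- A computes F(n+2)^2 % P
theorem A_closed (n : Int) (hn : 1 ≤ n) :
    countHousePlacements n = ((Nat.fib ((n + 2).toNat) : Int) ^ 2) % P := by
  have hlen : (PySem.List.pyRange 1 n).length = (n - 1).toNat := by simp [pysem]
  have hinv := foldA_invariant (PySem.List.pyRange 1 n) 0 [1] [1] [1] [1]
    (by simp [col, Nat.fib_one, Nat.fib_two]; norm_num [P])
  rw [hlen] at hinv
  simp only [col, Prod.mk.injEq, Nat.zero_add] at hinv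
  obtain ⟨h0, h1, h2, h3⟩ := hinv
  unfold countHousePlacements
  simp only [h0, h1, h2, h3, hmodP]
  have hc := (col_step ((n - 1).toNat)).1
  simp only [col] at hc
  rw [hc, show (n - 1).toNat + 3 = (n + 2).toNat by omega]

-- fast doubling computes Fibonacci mod P
theorem fibPairB_eq (k : Nat) :
    fibPairB k = ((Nat.fib k : Int) % P, (Nat.fib (k + 1) : Int) % P) := by
  induction k using Nat.strong_induction_on with
  | _ k ih =>
    rw [fibPairB]
    by_cases hk : k = 0
    · subst hk; norm_num [P]
    · rw [dif_neg hk, ih (k / 2) (Nat.div_lt_self (Nat.pos_of_ne_zero hk) (by norm_num))]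
      set m := k / 2 with hm
      have hle : Nat.fib m ≤ 2 * Nat.fib (m + 1) :=
        le_trans Nat.fib_le_fib_succ (by omega)
      have h2m : (Nat.fib (2 * m) : Int)
          = (Nat.fib m : Int) * (2 * (Nat.fib (m + 1) : Int) - (Nat.fib m : Int)) := by
        have h := Nat.fib_two_mul m
        zify [hle] at h
        exact h
      have h2m1 : (Nat.fib (2 * m + 1) : Int)
          = (Nat.fib m : Int) * (Nat.fib m : Int)
            + (Nat.fib (m + 1) : Int) * (Nat.fib (m + 1) : Int) := by
        have h : (Nat.fib (2 * m + 1) : Int)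
            = (Nat.fib (m + 1) : Int) ^ 2 + (Nat.fib m : Int) ^ 2 := by
          exact_mod_cast congrArg (Nat.cast (R := Int)) (Nat.fib_two_mul_add_one m)
        rw [h]; ring
      have hc : PySem.Int.mod (((Nat.fib m : Int) % P)
            * (2 * ((Nat.fib (m + 1) : Int) % P) - (Nat.fib m : Int) % P)) (10 ^ 9 + 7)
          = (Nat.fib (2 * m) : Int) % P := by
        rw [hmodP, h2m]
        exact (modeq_emod _).mul (((Int.ModEq.refl 2).mul (modeq_emod _)).sub (modeq_emod _))
      have hd : PySem.Int.mod (((Nat.fib m : Int) % P) * ((Nat.fib m : Int) % P)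
            + ((Nat.fib (m + 1) : Int) % P) * ((Nat.fib (m + 1) : Int) % P)) (10 ^ 9 + 7)
          = (Nat.fib (2 * m + 1) : Int) % P := by
        rw [hmodP, h2m1]
        exact ((modeq_emod _).mul (modeq_emod _)).add ((modeq_emod _).mul (modeq_emod _))
      rcases Nat.even_or_odd k with he | ho
      · have h2 : k % 2 = 0 := Nat.even_iff.mp he
        have hk2 : 2 * m = k := by omega
        rw [if_neg (by omega : ¬ k % 2 = 1)]
        dsimp only
        rw [hc, hd, hk2]
      · have h1 : k % 2 = 1 := Nat.odd_iff.mp ho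
        rw [if_pos h1]
        dsimp only
        rw [hc, hd]
        have hadd : (Nat.fib (2 * m + 2) : Int)
            = (Nat.fib (2 * m) : Int) + (Nat.fib (2 * m + 1) : Int) := by
          exact_mod_cast congrArg (Nat.cast (R := Int)) (Nat.fib_add_two (n := 2 * m))
        have hsum : PySem.Int.mod ((Nat.fib (2 * m) : Int) % P
              + (Nat.fib (2 * m + 1) : Int) % P) (10 ^ 9 + 7)
            = (Nat.fib (2 * m + 2) : Int) % P := by
          rw [hmodP, hadd]
          exact (modeq_emod _).add (modeq_emod _)
        rw [hsum, show 2 * m + 2 = k + 1 by omega, show 2 * m + 1 = k by omega]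

-- B computes F(n+2)^2 % P
theorem B_closed (n : Int) :
    countHousePlacements_alt n = ((Nat.fib ((n + 2).toNat) : Int) ^ 2) % P := by
  unfold countHousePlacements_alt
  rw [fibPairB_eq, hmodP]
  exact Int.ModEq.pow 2 (modeq_emod _)

-- ===== VERDICT (by name: the statement is the Claim_ definition above) =====
theorem countHousePlacements_spec : Claim_equal_countHousePlacements := by
  intro n _ hpre
  unfold Spec_countHousePlacements
  rw [A_closed n hpre, B_closed n]
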